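-- pv_equiv track=rewrite | github.com/paulguardiola/projetAppariement | appMultiCritere/distText.py | ignorePunctuation
-- ===== SOURCE A (Python) =====
-- def ignorePunctuation(chaine) :
--     ponctuations = ".,;!#$/:?'()[]_-&{}"
--     chaineStrippee = chaine
--     chaineStrippee1 = ""
--     chaineStrippee2 = ""
--
--
--     for j in range(len(chaineStrippee)):
--         lettre = chaineStrippee[j]
--         a = 0
--         for i in range (len(ponctuations)):
--             caracter = ponctuations[i]
--
--             if lettre == caracter :
--                 a = 1
--
--         if a != 1 :
--             chaineStrippee1 += lettre
--
--     st =  StringTokenizer(chaineStrippee1)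
--     #// Méthode qui va éliminer les mots contenant maximum 2 caractères
--     for i in range(len(st)) :
--         mot = st[i];
--         if len(mot) > 2 :
--             chaineStrippee2 += mot
--             chaineStrippee2 += " "
--
--     return chaineStrippee2;
--
-- def StringTokenizer(chaine):
--     l = []
--     index = 0
--     for i in range(len(chaine)):
--         if chaine[i] == " ":
--             l.append(chaine[index:i])
--             index = i +1
--
--     if index != len(chaine) :
--         l.append(chaine[index:len(chaine)])
--     return l
-- ===== SOURCE B (Python) =====
-- def ignorePunctuation(chaine):
--     punct = set(".,;!#$/:?'()[]_-&{}")
--     res = ""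
--     word = ""
--     for ch in chaine:
--         if ch == " ":
--             if len(word) > 2:
--                 res += word + " "
--             word = ""
--         elif ch not in punct:
--             word += ch
--     if len(word) > 2:
--         res += word + " "
--     return res
-- ===== Notes on version B (the rewrite author's own statement) =====
-- stated objective: faster
-- what changed: A makes three passes (per-char inner loop over the 20 punctuation characters to strip them, an index/slice tokenizer, then a filter loop over the token list); B makes a single streaming pass over the string with a current-word accumulator and an O(1) set membership test, emitting a word plus a space whenever a completed word is longer than 2 characters.
import Mathlib
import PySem

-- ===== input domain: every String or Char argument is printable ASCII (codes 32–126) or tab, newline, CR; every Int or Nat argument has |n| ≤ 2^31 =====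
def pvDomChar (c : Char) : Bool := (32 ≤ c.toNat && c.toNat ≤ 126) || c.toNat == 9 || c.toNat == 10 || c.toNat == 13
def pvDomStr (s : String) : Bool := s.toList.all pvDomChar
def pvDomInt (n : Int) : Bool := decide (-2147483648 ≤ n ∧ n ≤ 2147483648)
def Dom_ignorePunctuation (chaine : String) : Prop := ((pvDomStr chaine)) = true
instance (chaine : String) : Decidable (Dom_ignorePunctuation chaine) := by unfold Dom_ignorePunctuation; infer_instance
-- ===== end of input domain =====

-- B streams once over the string with a current-word accumulator and per-char set membership,
-- replacing A's three passes (punctuation-flag inner loop, index/slice tokenizer, filter pass); return values proved equal on all strings.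


-- ===== PORT A =====
-- helper StringTokenizer, as in A: index loop appending slices chaine[index:i], then the trailing piece if index != len
def pvStringTokenizer (cs : List Char) : List (List Char) :=
  let r := (PySem.List.pyRange 0 (cs.length : Int) 1).foldl
    (fun (s : List (List Char) × Int) i =>
      if PySem.List.pyGetD cs i ' ' == ' ' then
        (s.1 ++ [PySem.List.slice cs (some s.2) (some i)], i + 1)
      else s) ([], 0)
  if r.2 ≠ (cs.length : Int) then r.1 ++ [PySem.List.slice cs (some r.2) (some (cs.length : Int))] else r.1

def ignorePunctuation (chaine : String) : String :=
  let chaineStrippee := chaine.toList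
  let chaineStrippee1 := chaineStrippee.foldl
    (fun acc lettre =>
      if (".,;!#$/:?'()[]_-&{}".toList.foldl
            (fun a caracter => if lettre == caracter then 1 else a) (0 : Nat)) ≠ 1 then
        acc ++ [lettre]
      else acc) ([] : List Char)
  let st := pvStringTokenizer chaineStrippee1
  let chaineStrippee2 := st.foldl
    (fun acc mot => if mot.length > 2 then acc ++ mot ++ [' '] else acc) ([] : List Char)
  String.ofList chaineStrippee2

-- ===== PORT B =====
def ignorePunctuation_alt (chaine : String) : String :=
  let punct := PySem.Set.ofList ".,;!#$/:?'()[]_-&{}".toList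
  let r := chaine.toList.foldl
    (fun (s : List Char × List Char) ch =>
      if ch == ' ' then
        (if s.2.length > 2 then s.1 ++ s.2 ++ [' '] else s.1, [])
      else if !(PySem.Set.contains punct ch) then (s.1, s.2 ++ [ch])
      else s) (([] : List Char), ([] : List Char))
  String.ofList (if r.2.length > 2 then r.1 ++ r.2 ++ [' '] else r.1)

-- ===== PRECONDITION & SPEC =====
def Spec_ignorePunctuation (chaine : String) (out : String) : Prop := out = ignorePunctuation_alt chaine
instance (chaine : String) (out : String) : Decidable (Spec_ignorePunctuation chaine out) := by unfold Spec_ignorePunctuation; infer_instance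

-- ===== CLAIM (what is proved, stated in full; the proofs are below) =====
def Claim_equal_ignorePunctuation : Prop := ∀ (chaine : String), Dom_ignorePunctuation chaine → Spec_ignorePunctuation chaine (ignorePunctuation chaine)

-- ===== LEMMAS AND PROOFS =====

-- the punctuation characters, for the proofs
def pvPunct : List Char := ".,;!#$/:?'()[]_-&{}".toList
-- keep a character?
def pvKeep (c : Char) : Bool := decide (c ∉ pvPunct)
-- recursive view of A's index/slice tokenizer: pending word, remaining characters
def pvTokRest : List Char → List Char → List (List Char)
  | p, [] => if p = [] then [] else [p]
  | p, c :: r => if c = ' ' then p :: pvTokRest [] r else pvTokRest (p ++ [c]) r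
-- emit a token (shared shape of A's second loop body and B's word emission)
def pvEmit (acc w : List Char) : List Char := if w.length > 2 then acc ++ w ++ [' '] else acc
-- the loop bodies as named functions (definitionally equal to the ports' lambdas)
def pvStepA (cs : List Char) (s : List (List Char) × Int) (i : Int) : List (List Char) × Int :=
  if PySem.List.pyGetD cs i ' ' == ' ' then
    (s.1 ++ [PySem.List.slice cs (some s.2) (some i)], i + 1)
  else s
def pvFinishA (cs : List Char) (r : List (List Char) × Int) : List (List Char) :=
  if r.2 ≠ (cs.length : Int) then r.1 ++ [PySem.List.slice cs (some r.2) (some (cs.length : Int))] else r.1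
def pvStepB (s : List Char × List Char) (ch : Char) : List Char × List Char :=
  if ch == ' ' then
    (if s.2.length > 2 then s.1 ++ s.2 ++ [' '] else s.1, [])
  else if !(PySem.Set.contains (PySem.Set.ofList ".,;!#$/:?'()[]_-&{}".toList) ch) then (s.1, s.2 ++ [ch])
  else s

lemma pv_A_eq (chaine : String) :
    ignorePunctuation chaine =
      String.ofList ((pvStringTokenizer (chaine.toList.foldl
        (fun acc lettre =>
          if (".,;!#$/:?'()[]_-&{}".toList.foldl
                (fun a caracter => if lettre == caracter then 1 else a) (0 : Nat)) ≠ 1 then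
            acc ++ [lettre]
          else acc) ([] : List Char))).foldl pvEmit []) := rfl

lemma pv_alt_eq (chaine : String) :
    ignorePunctuation_alt chaine =
      String.ofList (pvEmit (chaine.toList.foldl pvStepB ([], [])).1
                            (chaine.toList.foldl pvStepB ([], [])).2) := rfl

lemma pv_tokenizer_eq (cs : List Char) :
    pvStringTokenizer cs =
      pvFinishA cs ((PySem.List.pyRange 0 (cs.length : Int) 1).foldl (pvStepA cs) ([], 0)) := rfl

lemma pv_flag (l : Char) (ps : List Char) (a : Nat) :
    ps.foldl (fun a c => if l == c then 1 else a) a = if l ∈ ps then 1 else a := by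
  induction ps generalizing a with
  | nil => simp
  | cons c cs ih =>
    rw [List.foldl_cons, ih]
    by_cases h1 : l = c <;> by_cases h2 : l ∈ cs <;> simp [h1, h2]

lemma pv_clean' (cs : List Char) (acc : List Char) :
    cs.foldl (fun acc l => if l ∈ pvPunct then acc else acc ++ [l]) acc = acc ++ cs.filter pvKeep := by
  induction cs generalizing acc with
  | nil => simp
  | cons c cs ih =>
    rw [List.foldl_cons, ih]
    by_cases h : c ∈ pvPunct <;> simp [pvKeep, h]

lemma pv_clean (cs : List Char) (acc : List Char) :
    cs.foldl
      (fun acc lettre =>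
        if (".,;!#$/:?'()[]_-&{}".toList.foldl
              (fun a caracter => if lettre == caracter then 1 else a) (0 : Nat)) ≠ 1 then
          acc ++ [lettre]
        else acc) acc = acc ++ cs.filter pvKeep := by
  have hlit : ".,;!#$/:?'()[]_-&{}".toList = pvPunct := rfl
  have hf : (fun (acc : List Char) lettre =>
      if (".,;!#$/:?'()[]_-&{}".toList.foldl
            (fun a caracter => if lettre == caracter then 1 else a) (0 : Nat)) ≠ 1 then
        acc ++ [lettre]
      else acc) = fun acc l => if l ∈ pvPunct then acc else acc ++ [l] := by
    funext acc l
    rw [hlit, pv_flag]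
    by_cases h : l ∈ pvPunct <;> simp [h]
  rw [hf, pv_clean']

lemma pv_tok_inv (cs : List Char) : ∀ (d i k : Nat) (l : List (List Char)),
    i + d = cs.length → k ≤ i →
    pvFinishA cs ((PySem.List.pyRange (i : Int) (cs.length : Int) 1).foldl (pvStepA cs) (l, (k : Int)))
      = l ++ pvTokRest ((cs.drop k).take (i - k)) (cs.drop i) := by
  intro d
  induction d with
  | zero =>
    intro i k l hi hk
    have hin : i = cs.length := by omega
    subst hin
    rw [PySem.List.pyRange_one_eq_nil (le_refl _), List.foldl_nil]
    simp only [pvFinishA]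
    by_cases hkl : k = cs.length
    · subst hkl
      simp [pvTokRest, List.drop_length]
    · have hklt : k < cs.length := by omega
      rw [if_pos (by exact_mod_cast hkl)]
      rw [PySem.List.slice_natCast]
      have htk : List.take (cs.length - k) (List.drop k cs) = cs.drop k := by
        apply List.take_of_length_le
        simp
      have hne : cs.drop k ≠ [] := by
        simp only [ne_eq, List.drop_eq_nil_iff]
        omega
      rw [htk, List.drop_length]
      simp [pvTokRest, hne]
  | succ d ih =>
    intro i k l hi hk
    have hilt : i < cs.length := by omega
    rw [PySem.List.pyRange_one_cons (by exact_mod_cast hilt), List.foldl_cons]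
    simp only [pvStepA, PySem.List.pyGetD_natCast]
    have hg : cs.getD i ' ' = cs[i] := List.getD_eq_getElem cs ' ' hilt
    have hcast : ((i : Int) + 1) = (((i + 1 : Nat)) : Int) := by push_cast; ring
    by_cases hc : cs[i] = ' '
    · rw [hg, if_pos (by simp [hc]), hcast]
      rw [ih (i + 1) (i + 1) _ (by omega) (le_refl _)]
      rw [PySem.List.slice_natCast]
      rw [List.drop_eq_getElem_cons hilt]
      simp [pvTokRest, hc]
    · rw [hg, if_neg (by simp [hc]), hcast]
      rw [ih (i + 1) k l (by omega) (by omega)]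
      have htake : (cs.drop k).take (i + 1 - k) = (cs.drop k).take (i - k) ++ [cs[i]] := by
        have h1 : i + 1 - k = (i - k) + 1 := by omega
        rw [h1, List.take_add_one]
        have h2 : (cs.drop k)[i - k]? = some cs[i] := by
          rw [List.getElem?_drop, List.getElem?_eq_getElem (by omega)]
          have h3 : k + (i - k) = i := by omega
          simp [h3]
        rw [h2]
        rfl
      rw [htake, List.drop_eq_getElem_cons hilt]
      simp [pvTokRest, hc]

lemma pv_tokenizer (cs : List Char) : pvStringTokenizer cs = pvTokRest [] cs := by
  rw [pv_tokenizer_eq]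
  have h := pv_tok_inv cs cs.length 0 0 [] (by omega) (by omega)
  simpa using h

lemma pv_keep_space : pvKeep ' ' = true := by decide

lemma pv_B_loop (cs : List Char) : ∀ (acc w : List Char),
    pvEmit (cs.foldl pvStepB (acc, w)).1 (cs.foldl pvStepB (acc, w)).2
      = (pvTokRest w (cs.filter pvKeep)).foldl pvEmit acc := by
  induction cs with
  | nil =>
    intro acc w
    by_cases hw : w = []
    · simp [hw, pvTokRest, pvEmit]
    · simp [hw, pvTokRest]
  | cons c cs ih =>
    intro acc w
    rw [List.foldl_cons]
    by_cases hc : c = ' '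
    · subst hc
      have hs : pvStepB (acc, w) ' ' = (pvEmit acc w, []) := by
        simp [pvStepB, pvEmit]
      rw [hs, ih]
      simp [pv_keep_space, pvTokRest]
    · by_cases hk : c ∈ pvPunct
      · have hs : pvStepB (acc, w) c = (acc, w) := by
          have hmem : PySem.Set.contains (PySem.Set.ofList ".,;!#$/:?'()[]_-&{}".toList) c = true := by
            rw [PySem.Set.contains_iff]
            exact (PySem.Set.mem_ofList _ _).mpr hk
          unfold pvStepB
          rw [if_neg (by simp [hc]), hmem]
          simp
        have hkeep : pvKeep c = false := by simp [pvKeep, hk]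
        rw [hs, ih]
        simp [hkeep]
      · have hs : pvStepB (acc, w) c = (acc, w ++ [c]) := by
          have hmem : PySem.Set.contains (PySem.Set.ofList ".,;!#$/:?'()[]_-&{}".toList) c = false := by
            rw [← Bool.not_eq_true, PySem.Set.contains_iff]
            intro hmem
            exact hk ((PySem.Set.mem_ofList _ _).mp hmem)
          unfold pvStepB
          rw [if_neg (by simp [hc]), hmem]
          simp
        have hkeep : pvKeep c = true := by simp [pvKeep, hk]
        rw [hs, ih]
        simp [hkeep, pvTokRest, hc]

-- ===== VERDICT (by name: the statement is the Claim_ definition above) =====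
theorem ignorePunctuation_spec : Claim_equal_ignorePunctuation := by
  intro chaine _
  show ignorePunctuation chaine = ignorePunctuation_alt chaine
  rw [pv_A_eq, pv_clean, List.nil_append, pv_tokenizer, pv_alt_eq, pv_B_loop]
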